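-- pv_equiv track=rewrite | github.com/GregaGD/ZAP_TE_analysis | scripts/motif_enrichment.py | count_motifs_and_bases
-- ===== SOURCE A (Python) =====
-- from collections import Counter, defaultdict
--
-- def count_overlapping(seq, motif):
--     # counts overlapping occurrences
--     k = len(motif)
--     if k==0 or len(seq)<k: return 0
--     c=0; i=0
--     while True:
--         i = seq.find(motif, i)
--         if i==-1: break
--         c+=1; i+=1
--     return c
--
-- def count_motifs_and_bases(seqs, motifs):
--     mono = Counter()
--     di = Counter()
--     obs = Counter()
--     total_len = 0
--     total_di_positions = 0
--     # count observed motifs and mono/di composition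
--     for s in seqs:
--         total_len += len(s)
--         mono.update(s)
--         # dinucleotide composition
--         if len(s)>=2:
--             total_di_positions += (len(s)-1)
--             for i in range(len(s)-1):
--                 di[s[i:i+2]] += 1
--         # motif observation
--         for m in motifs:
--             obs[m] += count_overlapping(s, m)
--     return mono, di, obs, total_len, total_di_positions
-- ===== SOURCE B (Python) =====
-- def count_motifs_and_bases(seqs, motifs):
--     # One indexed pass per sequence; all motifs matched at once per position
--     # via a hash set of motifs grouped by their (few, distinct) lengths.
--     mono = {}
--     di = {}
--     obs = {}
--     total_len = 0
--     total_di_positions = 0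
--     lens = sorted(set(len(m) for m in motifs if m))
--     motifset = set(m for m in motifs if m)
--     for s in seqs:
--         n = len(s)
--         total_len += n
--         if n >= 2:
--             total_di_positions += n - 1
--         hits = {}
--         for i in range(n):
--             c = s[i]
--             mono[c] = mono.get(c, 0) + 1
--             if i < n - 1:
--                 d = s[i:i + 2]
--                 di[d] = di.get(d, 0) + 1
--             for k in lens:
--                 if i + k <= n:
--                     w = s[i:i + k]
--                     if w in motifset:
--                         hits[w] = hits.get(w, 0) + 1
--         for m in motifs:
--             obs[m] = obs.get(m, 0) + hits.get(m, 0)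
--     return mono, di, obs, total_len, total_di_positions
-- ===== Notes on version B (the rewrite author's own statement) =====
-- stated objective: faster
-- what changed: A scans every sequence once per motif with repeated str.find calls; B makes a single indexed pass per sequence, matching all motifs at once per position through a hash set of motifs keyed by their few distinct lengths (and counts mono/di composition in the same pass).
import Mathlib
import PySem

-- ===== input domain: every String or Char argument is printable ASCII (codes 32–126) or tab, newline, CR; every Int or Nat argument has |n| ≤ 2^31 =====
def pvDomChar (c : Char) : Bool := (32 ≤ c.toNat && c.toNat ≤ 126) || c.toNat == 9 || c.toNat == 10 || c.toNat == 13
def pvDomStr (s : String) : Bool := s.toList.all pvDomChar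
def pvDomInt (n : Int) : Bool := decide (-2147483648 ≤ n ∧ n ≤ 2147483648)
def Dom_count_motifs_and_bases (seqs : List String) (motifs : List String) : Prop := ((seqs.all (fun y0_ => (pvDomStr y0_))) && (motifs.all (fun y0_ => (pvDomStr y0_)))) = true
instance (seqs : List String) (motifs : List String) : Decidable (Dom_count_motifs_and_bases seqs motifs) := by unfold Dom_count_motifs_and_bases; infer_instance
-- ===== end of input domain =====

-- B replaces A's per-motif find-loops with a single indexed pass per sequence,
-- matching all motifs at once per position via a hash set of motifs grouped by
-- their distinct lengths (objective: faster; measured).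


-- state threaded through the outer loop of both ports: (mono, di, obs, total_len, total_di_positions)
abbrev pvSt := PySem.Dict String Int × PySem.Dict String Int × PySem.Dict String Int × Int × Int

-- ===== PORT A =====
-- the while-loop of count_overlapping; the hypotheses hm/hi are totality
-- bookkeeping only (the loop is only entered with a nonempty motif)
def pvCountGo (s m : List Char) (hm : 0 < m.length) (i : Nat) (hi : i ≤ s.length) (c : Int) : Int :=
  if hj : PySem.Chars.findFrom s m (i : Int) = -1 then c
  else
    have hspec := PySem.Chars.findFrom_natCast_spec s m i hi hj
    have hlt : (PySem.Chars.findFrom s m (i : Int)).toNat < s.length := by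
      have hpre := hspec.2.1
      have hlen := hpre.length_le
      simp at hlen
      omega
    pvCountGo s m hm ((PySem.Chars.findFrom s m (i : Int)).toNat + 1) (by omega) (c + 1)
termination_by s.length - i
decreasing_by
  omega

def pvCountOverlap (seq motif : String) : Int :=
  let s := seq.toList
  let m := motif.toList
  if m.length = 0 ∨ s.length < m.length then 0
  else if hm : 0 < m.length then pvCountGo s m hm 0 (by omega) 0 else 0

def pvStepA (motifs : List String) (st : pvSt) (s0 : String) : pvSt :=
  let s := s0.toList
  let n := s.length
  let tl := st.2.2.2.1 + (n : Int)
  let mono := s.foldl (fun d c => d.modify (String.ofList [c]) 0 (· + 1)) st.1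
  let td := if 2 ≤ n then st.2.2.2.2 + ((n : Int) - 1) else st.2.2.2.2
  let di := if 2 ≤ n then
      (PySem.List.pyRange 0 ((n : Int) - 1) 1).foldl
        (fun d i => d.modify (String.ofList (PySem.List.slice s (some i) (some (i + 2)))) 0 (· + 1)) st.2.1
    else st.2.1
  let obs := motifs.foldl (fun d m => d.modify m 0 (· + pvCountOverlap s0 m)) st.2.2.1
  (mono, di, obs, tl, td)

def count_motifs_and_bases (seqs : List String) (motifs : List String) : (List (String × Int)) × (List (String × Int)) × (List (String × Int)) × Int × Int :=
  let st := seqs.foldl (pvStepA motifs) (PySem.Dict.empty, PySem.Dict.empty, PySem.Dict.empty, 0, 0)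
  (st.1.items, st.2.1.items, st.2.2.1.items, st.2.2.2.1, st.2.2.2.2)

-- ===== PORT B =====
def pvWordAt (s : List Char) (i k : Int) : String :=
  String.ofList (PySem.List.slice s (some i) (some (i + k)))

-- body of B's "for i in range(n)" loop: mono/di/hits updated in one pass
def pvInnerB (s : List Char) (n : Nat) (lens : List Int) (motifset : List String)
    (st : PySem.Dict String Int × PySem.Dict String Int × PySem.Dict String Int) (i : Int) :
    PySem.Dict String Int × PySem.Dict String Int × PySem.Dict String Int :=
  let ck := String.ofList [PySem.List.pyGetD s i ' ']
  let mono := st.1.insert ck (st.1.getD ck 0 + 1)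
  let di := if i < (n : Int) - 1 then
      let w := String.ofList (PySem.List.slice s (some i) (some (i + 2)))
      st.2.1.insert w (st.2.1.getD w 0 + 1)
    else st.2.1
  let hits := lens.foldl (fun h k =>
      if i + k ≤ (n : Int) then
        let w := pvWordAt s i k
        if PySem.Set.contains motifset w then h.insert w (h.getD w 0 + 1) else h
      else h) st.2.2
  (mono, di, hits)

def pvStepB (motifs : List String) (lens : List Int) (motifset : List String) (st : pvSt) (s0 : String) : pvSt :=
  let s := s0.toList
  let n := s.length
  let tl := st.2.2.2.1 + (n : Int)
  let td := if 2 ≤ n then st.2.2.2.2 + ((n : Int) - 1) else st.2.2.2.2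
  let tr := (PySem.List.pyRange 0 (n : Int) 1).foldl (pvInnerB s n lens motifset) (st.1, st.2.1, PySem.Dict.empty)
  let obs := motifs.foldl (fun d m => d.insert m (d.getD m 0 + tr.2.2.getD m 0)) st.2.2.1
  (tr.1, tr.2.1, obs, tl, td)

def count_motifs_and_bases_alt (seqs : List String) (motifs : List String) : (List (String × Int)) × (List (String × Int)) × (List (String × Int)) × Int × Int :=
  let nonempty := motifs.filter (fun m => !(m == ""))
  let lens := PySem.List.sorted (PySem.Set.ofList (nonempty.map (fun m => (m.toList.length : Int)))) id
  let motifset := PySem.Set.ofList nonempty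
  let st := seqs.foldl (pvStepB motifs lens motifset) (PySem.Dict.empty, PySem.Dict.empty, PySem.Dict.empty, 0, 0)
  (st.1.items, st.2.1.items, st.2.2.1.items, st.2.2.2.1, st.2.2.2.2)

-- ===== PRECONDITION & SPEC =====
def Spec_count_motifs_and_bases (seqs : List String) (motifs : List String) (out : (List (String × Int)) × (List (String × Int)) × (List (String × Int)) × Int × Int) : Prop := out = count_motifs_and_bases_alt seqs motifs
instance (seqs : List String) (motifs : List String) (out : (List (String × Int)) × (List (String × Int)) × (List (String × Int)) × Int × Int) : Decidable (Spec_count_motifs_and_bases seqs motifs out) := by unfold Spec_count_motifs_and_bases; infer_instance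

-- ===== CLAIM (what is proved, stated in full; the proofs are below) =====
def Claim_equal_count_motifs_and_bases : Prop := ∀ (seqs : List String) (motifs : List String), Dom_count_motifs_and_bases seqs motifs → Spec_count_motifs_and_bases seqs motifs (count_motifs_and_bases seqs motifs)

-- ===== LEMMAS AND PROOFS =====

-- match predicate: motif m occurs in s at position j
def pvPre (m s : List Char) (j : Nat) : Bool := decide (m <+: List.drop j s)

-- number of occurrences at positions ≥ i
def pvMC (s m : List Char) (i : Nat) : Nat := (List.range' i (s.length - i)).countP (pvPre m s)

theorem pvMC_zero_of_none (s m : List Char) (i : Nat) (h : ¬ m <:+: List.drop i s) :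
    pvMC s m i = 0 := by
  apply List.countP_eq_zero.2
  intro j hj
  have hj' := List.mem_range'_1.1 hj
  simp only [pvPre, decide_eq_true_eq]
  intro hpre
  apply h
  rw [List.infix_iff_prefix_suffix]
  refine ⟨List.drop j s, ?_, ?_⟩
  · exact hpre
  · have : List.drop j s = List.drop (j - i) (List.drop i s) := by
      rw [List.drop_drop]; congr 1; omega
    rw [this]; exact List.drop_suffix _ _
  
theorem pvMC_step (s m : List Char) (i j0 : Nat) (hij : i ≤ j0) (hj0 : j0 < s.length)
    (hmatch : m <+: List.drop j0 s) (hnone : ∀ j, i ≤ j → j < j0 → ¬ m <+: List.drop j s) :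
    pvMC s m i = pvMC s m (j0 + 1) + 1 := by
  unfold pvMC
  have hsplit : List.range' i (s.length - i) = List.range' i (j0 - i) ++ List.range' j0 (s.length - j0) := by
    have := @List.range'_append i (j0 - i) (s.length - j0) 1
    simp only [one_mul] at this
    rw [show i + (j0 - i) = j0 by omega] at this
    rw [show s.length - i = (j0 - i) + (s.length - j0) by omega, ← this]
  rw [hsplit, List.countP_append]
  have h1 : (List.range' i (j0 - i)).countP (pvPre m s) = 0 := by
    apply List.countP_eq_zero.2
    intro j hj
    have := List.mem_range'_1.1 hj
    simp only [pvPre, decide_eq_true_eq]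
    exact hnone j (by omega) (by omega)
  have h2 : List.range' j0 (s.length - j0) = j0 :: List.range' (j0 + 1) (s.length - (j0 + 1)) := by
    rw [show s.length - j0 = (s.length - (j0 + 1)) + 1 by omega, List.range'_succ]
  rw [h1, h2, List.countP_cons]
  simp [pvPre, hmatch]

theorem pvCountGo_eq (s m : List Char) (hm : 0 < m.length) (i : Nat) (hi : i ≤ s.length) (c : Int) :
    pvCountGo s m hm i hi c = c + (pvMC s m i : Int) := by
  rw [pvCountGo]
  split
  · rename_i hj
    have hnone : ¬ m <:+: List.drop i s := (PySem.Chars.findFrom_natCast_eq_neg_one_iff s m i hi).1 hj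
    rw [pvMC_zero_of_none s m i hnone]
    simp
  · rename_i hj
    have hspec := PySem.Chars.findFrom_natCast_spec s m i hi hj
    have hlt : (PySem.Chars.findFrom s m (i : Int)).toNat < s.length := by
      have hlen := hspec.2.1.length_le
      simp at hlen
      omega
    rw [pvCountGo_eq s m hm _ (by omega) (c + 1)]
    rw [pvMC_step s m i (PySem.Chars.findFrom s m (i : Int)).toNat (by omega) hlt hspec.2.1
      (fun j h1 h2 => hspec.2.2 j h1 h2)]
    push_cast
    ring
termination_by s.length - i
decreasing_by
  omega

-- prefix at j ↔ the k = |m| slice matches and fits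
theorem pvPre_iff_slice (m s : List Char) (hm : 0 < m.length) (j : Nat) :
    (m <+: List.drop j s) ↔ (j + m.length ≤ s.length ∧ List.take m.length (List.drop j s) = m) := by
  constructor
  · intro h
    have hlen := h.length_le
    rw [List.length_drop] at hlen
    refine ⟨by omega, ?_⟩
    exact (List.prefix_iff_eq_take.1 h).symm
  · intro ⟨h1, h2⟩
    exact List.prefix_iff_eq_take.2 h2.symm

-- A's count_overlapping equals the number of match positions
theorem pvCountOverlap_eq (s0 m0 : String) (hm : m0.toList ≠ []) :
    pvCountOverlap s0 m0 = ((List.range s0.toList.length).countP (pvPre m0.toList s0.toList) : Int) := by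
  unfold pvCountOverlap
  have hmlen : 0 < m0.toList.length := List.length_pos_of_ne_nil hm
  by_cases hlt : s0.toList.length < m0.toList.length
  · rw [if_pos (Or.inr hlt)]
    have : (List.range s0.toList.length).countP (pvPre m0.toList s0.toList) = 0 := by
      apply List.countP_eq_zero.2
      intro j hj
      simp only [pvPre, decide_eq_true_eq]
      intro hpre
      have hle := hpre.length_le
      rw [List.length_drop] at hle
      have hjr := List.mem_range.1 hj
      omega
    rw [this]
    simp
  · rw [if_neg (by omega), dif_pos hmlen, pvCountGo_eq]
    simp [pvMC, List.range_eq_range']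

-- ---- B side ----

-- generic: a guarded fold is a fold over the filtered-and-mapped list
theorem pvFoldlFilterMap {α β σ : Type} (l : List α) (p : α → Bool) (w : α → β) (g : σ → β → σ) (acc : σ) :
    l.foldl (fun h k => if p k then g h (w k) else h) acc = ((l.filter p).map w).foldl g acc := by
  induction l generalizing acc with
  | nil => rfl
  | cons x xs ih =>
    simp only [List.foldl_cons, List.filter_cons]
    by_cases hx : p x = true
    · simp [hx, ih]
    · simp [hx, ih]

-- counting in a list with at most one possible hit
theorem pvCountP_unique {l : List Int} (hnd : l.Nodup) (k0 : Int) (p : Int → Bool)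
    (hp : ∀ k ∈ l, p k = true → k = k0) :
    l.countP p = if k0 ∈ l ∧ p k0 = true then 1 else 0 := by
  induction l with
  | nil => simp
  | cons x xs ih =>
    rw [List.countP_cons]
    have hxmem := (List.nodup_cons.1 hnd).1
    rw [ih (List.nodup_cons.1 hnd).2 (fun k hk => hp k (List.mem_cons_of_mem _ hk))]
    simp only [List.mem_cons]
    by_cases hx : p x = true
    · have hxk := hp x (by simp) hx
      subst hxk
      simp [hx, hxmem]
    · by_cases hkx : k0 = x
      · subst hkx
        simp [hx]
      · simp [hx, hkx]

-- the words list B's inner per-position loop inserts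
def pvWords (s : List Char) (n : Nat) (lens : List Int) (motifset : List String) (i : Int) : List String :=
  ((lens.filter (fun k => decide (i + k ≤ (n : Int)) && PySem.Set.contains motifset (pvWordAt s i k))).map (pvWordAt s i))

-- B's hits component is a counting fold over the concatenated words lists
theorem pvHits_eq_count (s : List Char) (n : Nat) (lens : List Int) (motifset : List String) (m : String) :
    (((PySem.List.pyRange 0 (n : Int) 1).flatMap (pvWords s n lens motifset)).foldl
        (fun (h : PySem.Dict String Int) w => h.insert w (h.getD w 0 + 1)) PySem.Dict.empty).getD m 0
      = (List.count m ((PySem.List.pyRange 0 (n : Int) 1).flatMap (pvWords s n lens motifset)) : Int) := by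
  rw [PySem.Dict.getD_foldl_insert_add_one]
  simp

-- per position: B's inner lens-loop is the insert-fold over pvWords
theorem pvInner_hits (s : List Char) (n : Nat) (lens : List Int) (motifset : List String) (i : Int)
    (h : PySem.Dict String Int) :
    lens.foldl (fun h k =>
      if i + k ≤ (n : Int) then
        let w := pvWordAt s i k
        if PySem.Set.contains motifset w then h.insert w (h.getD w 0 + 1) else h
      else h) h
    = (pvWords s n lens motifset i).foldl (fun h w => h.insert w (h.getD w 0 + 1)) h := by
  unfold pvWords
  rw [← pvFoldlFilterMap]
  apply PySem.List.foldl_congr_mem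
  intro acc k _
  by_cases h1 : i + k ≤ (n : Int)
  · simp [h1]
  · simp [h1]


theorem pvFoldl_triple {σ₁ σ₂ σ₃ β : Type} (f : σ₁ → β → σ₁) (g : σ₂ → β → σ₂) (h : σ₃ → β → σ₃)
    (l : List β) (a : σ₁) (b : σ₂) (c : σ₃) :
    l.foldl (fun st e => (f st.1 e, g st.2.1 e, h st.2.2 e)) (a, b, c)
      = (l.foldl f a, l.foldl g b, l.foldl h c) := by
  induction l generalizing a b c with
  | nil => rfl
  | cons x xs ih => simp only [List.foldl_cons]; exact ih _ _ _

theorem pvSum_ite_nat {α : Type} (p : α → Bool) (l : List α) :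
    (l.map (fun x => if p x then 1 else 0)).sum = l.countP p := by
  induction l with
  | nil => rfl
  | cons x xs ih =>
    simp only [List.map_cons, List.sum_cons, List.countP_cons, ih]
    by_cases h : p x = true <;> simp [h] <;> omega

theorem pvStr_ne_empty_iff (m : String) : m.toList ≠ [] ↔ m ≠ "" := by
  constructor
  · intro h hc; subst hc; exact h rfl
  · intro h hc
    apply h
    have h2 := congrArg String.ofList hc
    rw [String.ofList_toList] at h2
    simpa using h2

theorem pvMem_lens (motifs : List String) (k : Int) :
    k ∈ PySem.List.sorted (PySem.Set.ofList ((motifs.filter (fun m => !(m == ""))).map (fun m => (m.toList.length : Int)))) id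
    ↔ ∃ m' ∈ motifs, m' ≠ "" ∧ (m'.toList.length : Int) = k := by
  rw [(PySem.List.sorted_perm _ _ _).mem_iff, PySem.Set.mem_ofList, List.mem_map]
  constructor
  · rintro ⟨m', hm', rfl⟩
    have := List.mem_filter.1 hm'
    exact ⟨m', this.1, by simpa using this.2, rfl⟩
  · rintro ⟨m', hm', hne, rfl⟩
    exact ⟨m', List.mem_filter.2 ⟨hm', by simpa using hne⟩, rfl⟩

theorem pvLens_nodup (motifs : List String) :
    (PySem.List.sorted (PySem.Set.ofList ((motifs.filter (fun m => !(m == ""))).map (fun m => (m.toList.length : Int)))) id).Nodup :=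
  ((PySem.List.sorted_perm _ _ _).nodup_iff).2 (PySem.Set.nodup_ofList _)

theorem pvMem_motifset (motifs : List String) (x : String) :
    x ∈ PySem.Set.ofList (motifs.filter (fun m => !(m == ""))) ↔ x ∈ motifs ∧ x ≠ "" := by
  rw [PySem.Set.mem_ofList, List.mem_filter]
  constructor
  · rintro ⟨h1, h2⟩; exact ⟨h1, by simpa using h2⟩
  · rintro ⟨h1, h2⟩; exact ⟨h1, by simpa using h2⟩

theorem pvWordAt_eq (s : List Char) (i k : Int) (hi : 0 ≤ i) (hk : 0 ≤ k) :
    pvWordAt s i k = String.ofList (List.take k.toNat (List.drop i.toNat s)) := by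
  unfold pvWordAt
  rw [PySem.List.slice_toNat s hi (by omega)]
  congr 2
  omega


-- componentwise update functions of B's inner loop
def pvFm (s : List Char) (d : PySem.Dict String Int) (i : Int) : PySem.Dict String Int :=
  let ck := String.ofList [PySem.List.pyGetD s i ' ']
  d.insert ck (d.getD ck 0 + 1)

def pvFd (s : List Char) (n : Nat) (d : PySem.Dict String Int) (i : Int) : PySem.Dict String Int :=
  if i < (n : Int) - 1 then
    let w := String.ofList (PySem.List.slice s (some i) (some (i + 2)))
    d.insert w (d.getD w 0 + 1)
  else d

def pvFh (s : List Char) (n : Nat) (lens : List Int) (motifset : List String)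
    (h : PySem.Dict String Int) (i : Int) : PySem.Dict String Int :=
  lens.foldl (fun h k =>
      if i + k ≤ (n : Int) then
        let w := pvWordAt s i k
        if PySem.Set.contains motifset w then h.insert w (h.getD w 0 + 1) else h
      else h) h

theorem pvInnerB_pair (s : List Char) (n : Nat) (lens : List Int) (motifset : List String) :
    pvInnerB s n lens motifset
    = fun st i => (pvFm s st.1 i, pvFd s n st.2.1 i, pvFh s n lens motifset st.2.2 i) := rfl

-- per position i: # of copies of motif m among the inserted words = 1 iff m matches at i
theorem pvCount_words (s : List Char) (motifs : List String) (m : String)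
    (hmm : m ∈ motifs) (hm : m.toList ≠ []) (i : Int) (hi0 : 0 ≤ i) :
    List.count m (pvWords s s.length
      (PySem.List.sorted (PySem.Set.ofList ((motifs.filter (fun m => !(m == ""))).map (fun m => (m.toList.length : Int)))) id)
      (PySem.Set.ofList (motifs.filter (fun m => !(m == "")))) i)
    = if pvPre m.toList s i.toNat then 1 else 0 := by
  have hmlen : 0 < m.toList.length := List.length_pos_of_ne_nil hm
  have hmne : m ≠ "" := (pvStr_ne_empty_iff m).1 hm
  unfold pvWords
  rw [List.count_eq_countP, List.countP_map, List.countP_filter]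
  have hp : ∀ k ∈ PySem.List.sorted (PySem.Set.ofList ((motifs.filter (fun m => !(m == ""))).map (fun m => (m.toList.length : Int)))) id,
      (((fun x => x == m) ∘ pvWordAt s i) k && (decide (i + k ≤ (s.length : Int)) && PySem.Set.contains (PySem.Set.ofList (motifs.filter (fun m => !(m == "")))) (pvWordAt s i k))) = true → k = (m.toList.length : Int) := by
    intro k hk hpk
    simp only [Function.comp, Bool.and_eq_true, beq_iff_eq, decide_eq_true_eq] at hpk
    obtain ⟨hkm, hkle, _⟩ := hpk
    obtain ⟨m', _, hne', hkval⟩ := (pvMem_lens motifs k).1 hk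
    have hk1 : 0 < k := by
      have := List.length_pos_of_ne_nil ((pvStr_ne_empty_iff m').2 hne')
      omega
    rw [pvWordAt_eq s i k hi0 (by omega)] at hkm
    have htake : List.take k.toNat (List.drop i.toNat s) = m.toList := by
      have := congrArg String.toList hkm
      simpa using this
    have hlen := congrArg List.length htake
    rw [List.length_take, List.length_drop] at hlen
    omega
  rw [pvCountP_unique (pvLens_nodup motifs) (m.toList.length : Int) _ hp]
  by_cases hpre : pvPre m.toList s i.toNat = true
  · have hsl := (pvPre_iff_slice m.toList s hmlen i.toNat).1 (by simpa [pvPre] using hpre)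
    rw [if_pos, if_pos hpre]
    constructor
    · exact (pvMem_lens motifs _).2 ⟨m, hmm, hmne, rfl⟩
    · simp only [Function.comp, Bool.and_eq_true, beq_iff_eq, decide_eq_true_eq]
      refine ⟨?_, by omega, ?_⟩
      · rw [pvWordAt_eq s i _ hi0 (by positivity)]
        rw [Int.toNat_natCast, hsl.2, String.ofList_toList]
      · rw [PySem.Set.contains_iff, pvWordAt_eq s i _ hi0 (by positivity),
          Int.toNat_natCast, hsl.2, String.ofList_toList]
        exact (pvMem_motifset motifs m).2 ⟨hmm, hmne⟩
  · rw [if_neg, if_neg hpre]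
    rintro ⟨_, hpk⟩
    simp only [Function.comp, Bool.and_eq_true, beq_iff_eq, decide_eq_true_eq] at hpk
    obtain ⟨hkm, hkle, _⟩ := hpk
    rw [pvWordAt_eq s i _ hi0 (by positivity)] at hkm
    have htake : List.take m.toList.length (List.drop i.toNat s) = m.toList := by
      have := congrArg String.toList hkm
      simpa using this
    apply hpre
    simp only [pvPre, decide_eq_true_eq]
    exact (pvPre_iff_slice m.toList s hmlen i.toNat).2 ⟨by omega, htake⟩

-- hits value for every motif m equals A's count_overlapping
theorem pvHits_val (s0 : String) (motifs : List String) (m : String) (hmm : m ∈ motifs) :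
    (((PySem.List.pyRange 0 (s0.toList.length : Int) 1).flatMap
        (pvWords s0.toList s0.toList.length
          (PySem.List.sorted (PySem.Set.ofList ((motifs.filter (fun m => !(m == ""))).map (fun m => (m.toList.length : Int)))) id)
          (PySem.Set.ofList (motifs.filter (fun m => !(m == ""))))))
      |>.foldl (fun (h : PySem.Dict String Int) w => h.insert w (h.getD w 0 + 1)) PySem.Dict.empty).getD m 0
    = pvCountOverlap s0 m := by
  rw [pvHits_eq_count]
  by_cases hm0 : m.toList = []
  · have hmE : m = "" := by
      have h2 := congrArg String.ofList hm0
      rw [String.ofList_toList] at h2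
      simpa using h2
    have hcnt : List.count m ((PySem.List.pyRange 0 (s0.toList.length : Int) 1).flatMap
        (pvWords s0.toList s0.toList.length (PySem.List.sorted (PySem.Set.ofList ((motifs.filter (fun m => !(m == ""))).map (fun m => (m.toList.length : Int)))) id) (PySem.Set.ofList (motifs.filter (fun m => !(m == "")))))) = 0 := by
      rw [List.count_eq_zero]
      intro hmem
      rw [List.mem_flatMap] at hmem
      obtain ⟨i, _, hw⟩ := hmem
      unfold pvWords at hw
      rw [List.mem_map] at hw
      obtain ⟨k, hk, hkm⟩ := hw
      have := (List.mem_filter.1 hk).2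
      simp only [Bool.and_eq_true, decide_eq_true_eq] at this
      have hms := (PySem.Set.contains_iff _ _).1 this.2
      have := ((pvMem_motifset motifs _).1 hms).2
      rw [hkm, hmE] at this
      exact this rfl
    rw [hcnt]
    unfold pvCountOverlap
    rw [if_pos (Or.inl (by simp [hm0]))]
    rfl
  · rw [pvCountOverlap_eq s0 m hm0]
    congr 1
    rw [List.count_flatMap, PySem.List.pyRange_one 0 (s0.toList.length : Int), List.map_map]
    have hcong : ∀ k ∈ List.range ((s0.toList.length : Int) - 0).toNat,
        ((List.count m ∘ pvWords s0.toList s0.toList.length (PySem.List.sorted (PySem.Set.ofList ((motifs.filter (fun m => !(m == ""))).map (fun m => (m.toList.length : Int)))) id) (PySem.Set.ofList (motifs.filter (fun m => !(m == ""))))) ∘ fun (j : Nat) => (0 : Int) + (j : Int)) k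
          = (fun j => if pvPre m.toList s0.toList j then 1 else 0) k := by
      intro k _
      simp only [Function.comp]
      rw [show (0 : Int) + (k : Int) = (k : Int) by ring]
      rw [pvCount_words s0.toList motifs m hmm hm0 (k : Int) (by positivity)]
      rw [Int.toNat_natCast]
    rw [List.map_congr_left hcong]
    rw [pvSum_ite_nat]
    rw [show ((s0.toList.length : Int) - 0).toNat = s0.toList.length by omega]

-- mono component: the indexed pass equals A's fold over the characters
theorem pvMono_eq (s : List Char) (d : PySem.Dict String Int) :
    (PySem.List.pyRange 0 (s.length : Int) 1).foldl (pvFm s) d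
      = s.foldl (fun d c => d.modify (String.ofList [c]) 0 (· + 1)) d :=
  PySem.List.foldl_pyRange_zero_pyGetD' s ' '
    (fun d c => PySem.Dict.insert d (String.ofList [c]) (d.getD (String.ofList [c]) 0 + 1)) d

-- di component
theorem pvDi_eq (s : List Char) (d : PySem.Dict String Int) :
    (if 2 ≤ s.length then
        (PySem.List.pyRange 0 ((s.length : Int) - 1) 1).foldl
          (fun d i => d.modify (String.ofList (PySem.List.slice s (some i) (some (i + 2)))) 0 (· + 1)) d
      else d)
    = (PySem.List.pyRange 0 (s.length : Int) 1).foldl (pvFd s s.length) d := by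
  rcases Nat.eq_zero_or_pos s.length with h0 | h1
  · rw [h0]
    simp [PySem.List.pyRange_one_eq_nil]
  · rw [PySem.List.pyRange_one_append 0 ((s.length : Int) - 1) (s.length : Int) (by omega) (by omega),
      List.foldl_append]
    have hlast : PySem.List.pyRange ((s.length : Int) - 1) (s.length : Int) 1 = [(s.length : Int) - 1] := by
      have := PySem.List.pyRange_one_singleton ((s.length : Int) - 1)
      rw [show ((s.length : Int) - 1) + 1 = (s.length : Int) by ring] at this
      exact this
    rw [hlast]
    simp only [List.foldl_cons, List.foldl_nil]
    rw [show pvFd s s.length ((PySem.List.pyRange 0 ((s.length : Int) - 1) 1).foldl (pvFd s s.length) d) ((s.length : Int) - 1)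
        = (PySem.List.pyRange 0 ((s.length : Int) - 1) 1).foldl (pvFd s s.length) d from by
      unfold pvFd; rw [if_neg (by omega)]]
    have hmain : (PySem.List.pyRange 0 ((s.length : Int) - 1) 1).foldl (pvFd s s.length) d
        = (PySem.List.pyRange 0 ((s.length : Int) - 1) 1).foldl
            (fun d i => d.modify (String.ofList (PySem.List.slice s (some i) (some (i + 2)))) 0 (· + 1)) d := by
      apply PySem.List.foldl_congr_mem
      intro acc i hi
      have := PySem.List.mem_pyRange_one.1 hi
      unfold pvFd
      rw [if_pos (by omega)]
      rfl
    rw [hmain]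
    by_cases h2 : 2 ≤ s.length
    · rw [if_pos h2]
    · rw [if_neg h2]
      rw [show (s.length : Int) - 1 = 0 by omega]
      simp [PySem.List.pyRange_one_eq_nil]

-- hits component: the per-position loop is a counting fold over the words lists
theorem pvHitsFold_eq (s : List Char) (n : Nat) (lens : List Int) (motifset : List String) (d : PySem.Dict String Int) :
    (PySem.List.pyRange 0 (n : Int) 1).foldl (pvFh s n lens motifset) d
      = ((PySem.List.pyRange 0 (n : Int) 1).flatMap (pvWords s n lens motifset)).foldl
          (fun h w => h.insert w (h.getD w 0 + 1)) d := by
  rw [List.foldl_flatMap]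
  apply PySem.List.foldl_congr_mem
  intro acc i _
  exact pvInner_hits s n lens motifset i acc

-- the per-sequence steps agree
theorem pvStep_eq (motifs : List String) (st : pvSt) (s0 : String) :
    pvStepA motifs st s0
    = pvStepB motifs
        (PySem.List.sorted (PySem.Set.ofList ((motifs.filter (fun m => !(m == ""))).map (fun m => (m.toList.length : Int)))) id)
        (PySem.Set.ofList (motifs.filter (fun m => !(m == "")))) st s0 := by
  have hsplit : (PySem.List.pyRange 0 (s0.toList.length : Int) 1).foldl
      (pvInnerB s0.toList s0.toList.length
        (PySem.List.sorted (PySem.Set.ofList ((motifs.filter (fun m => !(m == ""))).map (fun m => (m.toList.length : Int)))) id)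
        (PySem.Set.ofList (motifs.filter (fun m => !(m == "")))))
      (st.1, st.2.1, PySem.Dict.empty)
      = ((PySem.List.pyRange 0 (s0.toList.length : Int) 1).foldl (pvFm s0.toList) st.1,
         (PySem.List.pyRange 0 (s0.toList.length : Int) 1).foldl (pvFd s0.toList s0.toList.length) st.2.1,
         (PySem.List.pyRange 0 (s0.toList.length : Int) 1).foldl
           (pvFh s0.toList s0.toList.length
             (PySem.List.sorted (PySem.Set.ofList ((motifs.filter (fun m => !(m == ""))).map (fun m => (m.toList.length : Int)))) id)
             (PySem.Set.ofList (motifs.filter (fun m => !(m == ""))))) PySem.Dict.empty) := by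
    rw [pvInnerB_pair]
    exact pvFoldl_triple _ _ _ _ _ _ _
  refine Prod.ext ?_ (Prod.ext ?_ (Prod.ext ?_ ?_))
  · show s0.toList.foldl (fun d c => d.modify (String.ofList [c]) 0 (· + 1)) st.1
      = ((PySem.List.pyRange 0 (s0.toList.length : Int) 1).foldl (pvInnerB _ _ _ _) (st.1, st.2.1, PySem.Dict.empty)).1
    rw [hsplit, pvMono_eq]
  · show (if 2 ≤ s0.toList.length then
        (PySem.List.pyRange 0 ((s0.toList.length : Int) - 1) 1).foldl
          (fun d i => d.modify (String.ofList (PySem.List.slice s0.toList (some i) (some (i + 2)))) 0 (· + 1)) st.2.1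
      else st.2.1)
      = ((PySem.List.pyRange 0 (s0.toList.length : Int) 1).foldl (pvInnerB _ _ _ _) (st.1, st.2.1, PySem.Dict.empty)).2.1
    rw [hsplit, ← pvDi_eq]
  · show motifs.foldl (fun d m => d.modify m 0 (· + pvCountOverlap s0 m)) st.2.2.1
      = motifs.foldl (fun d m => d.insert m (d.getD m 0 +
          (((PySem.List.pyRange 0 (s0.toList.length : Int) 1).foldl (pvInnerB s0.toList s0.toList.length (PySem.List.sorted (PySem.Set.ofList ((motifs.filter (fun m => !(m == ""))).map (fun m => (m.toList.length : Int)))) id) (PySem.Set.ofList (motifs.filter (fun m => !(m == ""))))) (st.1, st.2.1, PySem.Dict.empty)).2.2).getD m 0)) st.2.2.1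
    rw [hsplit]
    apply PySem.List.foldl_congr_mem
    intro acc m hm
    show acc.insert m (acc.getD m 0 + pvCountOverlap s0 m) = _
    rw [pvHitsFold_eq, pvHits_val s0 motifs m hm]
  · rfl

-- ===== VERDICT (by name: the statement is the Claim_ definition above) =====
theorem count_motifs_and_bases_spec : Claim_equal_count_motifs_and_bases := by
  intro seqs motifs _
  unfold Spec_count_motifs_and_bases count_motifs_and_bases count_motifs_and_bases_alt
  have h : seqs.foldl (pvStepA motifs) (PySem.Dict.empty, PySem.Dict.empty, PySem.Dict.empty, 0, 0)
      = seqs.foldl (pvStepB motifs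
          (PySem.List.sorted (PySem.Set.ofList ((motifs.filter (fun m => !(m == ""))).map (fun m => (m.toList.length : Int)))) id)
          (PySem.Set.ofList (motifs.filter (fun m => !(m == ""))))) (PySem.Dict.empty, PySem.Dict.empty, PySem.Dict.empty, 0, 0) := by
    apply PySem.List.foldl_congr_mem
    intro acc x _
    exact pvStep_eq motifs acc x
  rw [h]
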